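-- pv_equiv track=rewrite | github.com/kLayz3/microspill | utils/not_working/sample_spill.py | splice_zeros
-- ===== SOURCE A (Python) =====
-- def splice_zeros(l):
--     n0_right = 0
--     n0_left = 0
--     for i in range(len(l)-1, -1, -1):
--         if l[i] != 0:
--             n0_right = i
--             break
--     for i in range(0, len(l)):
--         if l[i] != 0:
--             n0_left = i
--             break
--
--     n0_right = len(l) - 2 if n0_right+2 > len(l) else n0_right
--     n0_left = 1 if n0_left == 0 else n0_left
--
--     return (l[n0_left-1 : n0_right+2], n0_left, n0_right)
-- ===== SOURCE B (Python) =====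
-- def splice_zeros(l):
--     # One forward pass maintaining zero-RUN counters (no index scans):
--     # lead  = length of the leading all-zero run (frozen at the first nonzero),
--     # trail = length of the current trailing zero run,
--     # all_zero = whether everything seen so far is zero.
--     lead = 0
--     trail = 0
--     all_zero = True
--     for x in l:
--         if x == 0:
--             trail += 1
--             if all_zero:
--                 lead += 1
--         else:
--             trail = 0
--             all_zero = False
--     n = len(l)
--     n0_left = 0 if all_zero else lead
--     n0_right = 0 if all_zero else n - trail - 1
--     n0_right = n - 2 if n0_right + 2 > n else n0_right
--     n0_left = 1 if n0_left == 0 else n0_left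
--     return (l[n0_left-1 : n0_right+2], n0_left, n0_right)
-- ===== Notes on version B (the rewrite author's own statement) =====
-- stated objective: alternative
-- what changed: Replaces A's two directional early-break index scans with one forward value pass that maintains zero-run counters (leading-zero run length, current trailing zero-run length, all-zero flag) and derives the boundary indices from those run lengths; no indexed access at all.
import Mathlib
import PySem

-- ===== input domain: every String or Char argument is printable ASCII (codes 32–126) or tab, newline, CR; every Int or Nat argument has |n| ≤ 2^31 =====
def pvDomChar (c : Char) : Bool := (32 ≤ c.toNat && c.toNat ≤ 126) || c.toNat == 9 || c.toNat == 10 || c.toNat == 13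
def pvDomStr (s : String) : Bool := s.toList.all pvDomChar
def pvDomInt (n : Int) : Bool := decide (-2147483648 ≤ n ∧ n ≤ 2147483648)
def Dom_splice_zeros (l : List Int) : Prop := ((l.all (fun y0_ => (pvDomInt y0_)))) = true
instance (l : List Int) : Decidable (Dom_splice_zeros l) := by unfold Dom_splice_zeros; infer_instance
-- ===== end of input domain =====

-- B replaces A's two directional early-break index scans by ONE forward value pass that
-- maintains zero-run counters (leading-zero run, current trailing-zero run, all-zero flag);
-- objective: alternative decomposition, same O(n) cost.

-- ===== PORT A =====
-- A's 'for i in range(...): if l[i] != 0: <set>; break' loops, with initial value 0 kept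
-- when no index matches.  Indices produced by range(...) are always in range, so
-- pyGetD (l[i] with default) is exact here.
def pvFindNZ (l : List Int) : List Int → Int
  | [] => 0
  | i :: rest => if PySem.List.pyGetD l i 0 ≠ 0 then i else pvFindNZ l rest

def splice_zeros (l : List Int) : List Int × Int × Int :=
  let n : Int := l.length
  let n0_right := pvFindNZ l (PySem.List.pyRange (n - 1) (-1) (-1))
  let n0_left := pvFindNZ l (PySem.List.pyRange 0 n 1)
  let n0_right := if n0_right + 2 > n then n - 2 else n0_right
  let n0_left := if n0_left = 0 then 1 else n0_left
  (PySem.List.slice l (some (n0_left - 1)) (some (n0_right + 2)), n0_left, n0_right)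

-- ===== PORT B =====
-- loop body of Source B: state = (lead, trail, all_zero)
def pvStep (s : Int × Int × Bool) (x : Int) : Int × Int × Bool :=
  if x = 0 then (s.1 + (if s.2.2 then 1 else 0), s.2.1 + 1, s.2.2)
  else (s.1, 0, false)

def splice_zeros_alt (l : List Int) : List Int × Int × Int :=
  let st := l.foldl pvStep (0, 0, true)
  let n : Int := l.length
  let n0_left : Int := if st.2.2 then 0 else st.1
  let n0_right : Int := if st.2.2 then 0 else n - st.2.1 - 1
  let n0_right := if n0_right + 2 > n then n - 2 else n0_right
  let n0_left := if n0_left = 0 then 1 else n0_left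
  (PySem.List.slice l (some (n0_left - 1)) (some (n0_right + 2)), n0_left, n0_right)

-- ===== PRECONDITION & SPEC =====
def Spec_splice_zeros (l : List Int) (out : List Int × Int × Int) : Prop := out = splice_zeros_alt l
instance (l : List Int) (out : List Int × Int × Int) : Decidable (Spec_splice_zeros l out) := by unfold Spec_splice_zeros; infer_instance

-- ===== CLAIM (what is proved, stated in full; the proofs are below) =====
def Claim_equal_splice_zeros : Prop := ∀ (l : List Int), Dom_splice_zeros l → Spec_splice_zeros l (splice_zeros l)

-- ===== LEMMAS AND PROOFS =====

-- pvFindNZ is head-of-filter with default 0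
lemma pvFindNZ_eq_filter (l : List Int) (idxs : List Int) :
    pvFindNZ l idxs = ((idxs.filter (fun i => PySem.List.pyGetD l i 0 ≠ 0)).head?).getD 0 := by
  induction idxs with
  | nil => rfl
  | cons i rest ih =>
    by_cases h : PySem.List.pyGetD l i 0 ≠ 0 <;> simp [pvFindNZ, h, ih]

-- the nonzero-index list of l, offset by s
def pvNZ (s : Int) : List Int → List Int
  | [] => []
  | x :: xs => if x ≠ 0 then s :: pvNZ (s + 1) xs else pvNZ (s + 1) xs

lemma pvRange_filter_aux (l : List Int) : ∀ (s : Int),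
    ((List.range l.length).map (fun k : Nat => s + (k : Int))).filter
        (fun i => PySem.List.pyGetD l (i - s) 0 ≠ 0) = pvNZ s l := by
  induction l with
  | nil => intro s; rfl
  | cons x xs ih =>
    intro s
    rw [List.length_cons, List.range_succ_eq_map, List.map_cons, List.map_map, List.filter_cons]
    have htail : ((List.range xs.length).map ((fun k : Nat => s + (k : Int)) ∘ Nat.succ)).filter
        (fun i => PySem.List.pyGetD (x :: xs) (i - s) 0 ≠ 0) = pvNZ (s + 1) xs := by
      have hm : (List.range xs.length).map ((fun k : Nat => s + (k : Int)) ∘ Nat.succ)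
          = (List.range xs.length).map (fun k : Nat => (s + 1) + (k : Int)) := by
        refine List.map_congr_left ?_
        intro k _; simp [Function.comp]; ring
      rw [hm, List.filter_congr, ih (s + 1)]
      intro i hi
      rcases List.mem_map.mp hi with ⟨k, _, rfl⟩
      have h1 : s + 1 + (k : Int) - s = ((k + 1 : Nat) : Int) := by push_cast; ring
      have h2 : s + 1 + (k : Int) - (s + 1) = ((k : Nat) : Int) := by ring
      rw [h1, h2, PySem.List.pyGetD_natCast, PySem.List.pyGetD_natCast]
      simp
    by_cases h : x = 0 <;>
      simp only [pvNZ, htail] <;>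
      simp [h, PySem.List.pyGetD_zero_cons]

lemma pyRange_filter_eq_pvNZ (l : List Int) :
    (PySem.List.pyRange 0 (l.length : Int) 1).filter (fun i => PySem.List.pyGetD l i 0 ≠ 0)
      = pvNZ 0 l := by
  have h := pvRange_filter_aux l 0
  rw [PySem.List.pyRange_one]
  simp only [Int.sub_zero] at h ⊢
  rw [List.filter_congr] at h
  · simpa using h
  · intro i _; simp

lemma left_eq (l : List Int) :
    pvFindNZ l (PySem.List.pyRange 0 (l.length : Int) 1)
      = ((pvNZ 0 l).head?).getD 0 := by
  rw [pvFindNZ_eq_filter, pyRange_filter_eq_pvNZ]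

lemma right_eq (l : List Int) :
    pvFindNZ l (PySem.List.pyRange ((l.length : Int) - 1) (-1) (-1))
      = ((pvNZ 0 l).getLast?).getD 0 := by
  have h : PySem.List.pyRange ((l.length : Int) - 1) (-1) (-1)
      = (PySem.List.pyRange 0 (l.length : Int) 1).reverse := by
    rw [PySem.List.pyRange_neg_one_eq_reverse]; norm_num
  rw [pvFindNZ_eq_filter, h, List.filter_reverse, List.head?_reverse, pyRange_filter_eq_pvNZ]

-- zero-run bookkeeping for B's fold
def pvLZ : List Int → Nat
  | [] => 0
  | x :: xs => if x = 0 then 1 + pvLZ xs else 0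

def pvAZ (l : List Int) : Bool := l.all (fun x => x == 0)

lemma pvLZ_append (u v : List Int) :
    pvLZ (u ++ v) = if pvAZ u then u.length + pvLZ v else pvLZ u := by
  induction u with
  | nil => simp [pvAZ]
  | cons x xs ih =>
    by_cases h : x = 0 <;> simp [pvLZ, pvAZ, h, ih, List.all_cons] <;> split_ifs <;>
      simp_all [pvAZ] <;> omega

lemma pvAZ_reverse (l : List Int) : pvAZ l.reverse = pvAZ l := by
  simp [pvAZ]

-- the fold invariant: final state from arbitrary start state
lemma pvFold_char (xs : List Int) : ∀ (lead trail : Int) (b : Bool),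
    xs.foldl pvStep (lead, trail, b)
      = (lead + (if b then (pvLZ xs : Int) else 0),
         if pvAZ xs then trail + (xs.length : Int) else (pvLZ xs.reverse : Int),
         b && pvAZ xs) := by
  induction xs with
  | nil => intro lead trail b; simp [pvAZ]
  | cons x xs ih =>
    intro lead trail b
    rw [List.foldl_cons]
    by_cases h : x = 0
    · rw [show pvStep (lead, trail, b) x = (lead + (if b then 1 else 0), trail + 1, b) by
        simp [pvStep, h]]
      rw [ih]
      have haz : pvAZ (x :: xs) = pvAZ xs := by simp [pvAZ, h]
      have hlz : pvLZ (x :: xs) = 1 + pvLZ xs := by simp [pvLZ, h]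
      have hrev : pvLZ ((x :: xs).reverse) = if pvAZ xs then xs.length + 1 else pvLZ xs.reverse := by
        rw [List.reverse_cons, pvLZ_append, pvAZ_reverse]
        split_ifs <;> simp [pvLZ, h, List.length_reverse]
      rw [haz, hlz, hrev]
      by_cases hb : b <;> by_cases ha : pvAZ xs <;>
        simp [hb, ha, Prod.ext_iff] <;> push_cast <;> omega
    · rw [show pvStep (lead, trail, b) x = (lead, 0, false) by simp [pvStep, h]]
      rw [ih]
      have haz : pvAZ (x :: xs) = false := by simp [pvAZ, h]
      have hlz : pvLZ (x :: xs) = 0 := by simp [pvLZ, h]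
      have hrev : pvLZ ((x :: xs).reverse) = if pvAZ xs then (xs.length : Nat) else pvLZ xs.reverse := by
        rw [List.reverse_cons, pvLZ_append, pvAZ_reverse]
        split_ifs <;> simp [pvLZ, h, List.length_reverse]
      rw [haz, hlz, hrev]
      by_cases ha : pvAZ xs <;> simp [ha]

lemma pvNZ_of_az (l : List Int) (h : pvAZ l = true) : ∀ s, pvNZ s l = [] := by
  induction l with
  | nil => intro s; rfl
  | cons x xs ih =>
    intro s
    simp [pvAZ, List.all_cons] at h
    have hxs : pvAZ xs = true := by simp [pvAZ]; exact h.2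
    simp [pvNZ, h.1, ih hxs]

lemma pvNZ_head (l : List Int) : ∀ s,
    (pvNZ s l).head? = if pvAZ l then none else some (s + (pvLZ l : Int)) := by
  induction l with
  | nil => intro s; rfl
  | cons x xs ih =>
    intro s
    by_cases h : x = 0
    · have : pvNZ s (x :: xs) = pvNZ (s + 1) xs := by simp [pvNZ, h]
      rw [this, ih]
      have : pvAZ (x :: xs) = pvAZ xs := by simp [pvAZ, h]
      rw [this]
      split_ifs with ha
      · rfl
      · simp [pvLZ, h]; push_cast; ring
    · have : pvNZ s (x :: xs) = s :: pvNZ (s + 1) xs := by simp [pvNZ, h]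
      rw [this]
      have : pvAZ (x :: xs) = false := by simp [pvAZ, h]
      simp [this, pvLZ, h]

lemma pvNZ_getLast (l : List Int) : ∀ s,
    (pvNZ s l).getLast? = if pvAZ l then none
      else some (s + (l.length : Int) - 1 - (pvLZ l.reverse : Int)) := by
  induction l with
  | nil => intro s; rfl
  | cons x xs ih =>
    intro s
    by_cases ha : pvAZ xs
    · by_cases h : x = 0
      · have h1 : pvNZ s (x :: xs) = pvNZ (s + 1) xs := by simp [pvNZ, h]
        have h2 : pvAZ (x :: xs) = true := by simp [pvAZ, h]; simpa [pvAZ] using ha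
        rw [h1, pvNZ_of_az xs ha, h2]; rfl
      · have h1 : pvNZ s (x :: xs) = s :: pvNZ (s + 1) xs := by simp [pvNZ, h]
        have h2 : pvAZ (x :: xs) = false := by simp [pvAZ, h]
        have h3 : pvLZ ((x :: xs).reverse) = xs.length := by
          rw [List.reverse_cons, pvLZ_append, pvAZ_reverse]
          simp [ha, pvLZ, h]
        rw [h1, pvNZ_of_az xs ha, h2, h3]
        simp; push_cast; ring
    · have hne : pvNZ (s + 1) xs ≠ [] := by
        intro hnil
        have := pvNZ_head xs (s + 1)
        rw [hnil] at this
        simp [ha] at this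
      have h3 : pvLZ ((x :: xs).reverse) = pvLZ xs.reverse := by
        rw [List.reverse_cons, pvLZ_append, pvAZ_reverse]
        simp [ha]
      by_cases h : x = 0
      · have h1 : pvNZ s (x :: xs) = pvNZ (s + 1) xs := by simp [pvNZ, h]
        have h2 : pvAZ (x :: xs) = false := by
          simp [pvAZ] at ha ⊢; tauto
        rw [h1, ih, h2, h3]
        simp [ha]; push_cast; ring_nf
      · have h1 : pvNZ s (x :: xs) = s :: pvNZ (s + 1) xs := by simp [pvNZ, h]
        have h2 : pvAZ (x :: xs) = false := by simp [pvAZ, h]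
        obtain ⟨y, ys, hys⟩ := List.exists_cons_of_ne_nil hne
        rw [h1, hys, List.getLast?_cons_cons, ← hys, ih, h2, h3]
        simp [ha]; push_cast; ring_nf

-- ===== VERDICT (by name: the statement is the Claim_ definition above) =====
theorem splice_zeros_spec : Claim_equal_splice_zeros := by
  intro l _
  show splice_zeros l = splice_zeros_alt l
  simp only [splice_zeros, splice_zeros_alt, left_eq, right_eq,
    pvFold_char l 0 0 true, pvNZ_head l 0, pvNZ_getLast l 0]
  by_cases ha : pvAZ l <;> simp [ha] <;> ring_nf <;> exact ⟨trivial, trivial⟩
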